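-- pv_equiv track=rewrite | github.com/itschurry/wealth-pulse | apps/api/services/research_contract.py | normalize_and_validate_warning_codes
-- ===== SOURCE A (Python) =====
-- from typing import Any
--
-- ALLOWED_WARNING_CODES = {
--     "headline_stronger_than_body",
--     "already_extended_intraday",
--     "low_evidence_density",
--     "theme_recycled",
--     "contrarian_flow_risk",
--     "policy_uncertainty",
--     "liquidity_mismatch",
--     "too_many_similar_news",
-- }
--
-- def normalize_and_validate_warning_codes(value: Any) -> list[str]:
--     if not isinstance(value, list):
--         raise ValueError("warnings_must_be_list")
--
--     normalized: list[str] = []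
--     for item in value:
--         code = str(item).strip()
--         if not code:
--             raise ValueError("warning_code_empty")
--         if code not in ALLOWED_WARNING_CODES:
--             raise ValueError("warning_code_unsupported")
--         normalized.append(code)
--
--     return list(dict.fromkeys(normalized))
-- ===== SOURCE B (Python) =====
-- from typing import Any
--
-- ALLOWED_WARNING_CODES = {
--     "headline_stronger_than_body",
--     "already_extended_intraday",
--     "low_evidence_density",
--     "theme_recycled",
--     "contrarian_flow_risk",
--     "policy_uncertainty",
--     "liquidity_mismatch",
--     "too_many_similar_news",
-- }
--
-- def normalize_and_validate_warning_codes(value: Any) -> list[str]: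
--     if not isinstance(value, list):
--         raise ValueError("warnings_must_be_list")
--
--     def rec(items: list) -> list[str]:
--         if not items:
--             return []
--         code = str(items[0]).strip()
--         if not code:
--             raise ValueError("warning_code_empty")
--         if code not in ALLOWED_WARNING_CODES:
--             raise ValueError("warning_code_unsupported")
--         # drop every later duplicate of this code, then recurse on the remainder;
--         # recursion depth is bounded by the number of distinct codes (<= 8)
--         return [code] + rec([it for it in items[1:] if str(it).strip() != code])
--
--     return rec(list(value))
-- ===== Notes on version B (the rewrite author's own statement) =====
-- stated objective: alternative
-- what changed: Replaces A's iterative build-then-dict.fromkeys pipeline with a recursive head/rest algorithm that keeps no auxiliary set or dict at all: it validates the head, filters every later duplicate of the head's code out of the tail, and recurses on the remainder, so deduplication happens by eager removal ahead of the traversal rather than by a membership structure.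
import Mathlib
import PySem

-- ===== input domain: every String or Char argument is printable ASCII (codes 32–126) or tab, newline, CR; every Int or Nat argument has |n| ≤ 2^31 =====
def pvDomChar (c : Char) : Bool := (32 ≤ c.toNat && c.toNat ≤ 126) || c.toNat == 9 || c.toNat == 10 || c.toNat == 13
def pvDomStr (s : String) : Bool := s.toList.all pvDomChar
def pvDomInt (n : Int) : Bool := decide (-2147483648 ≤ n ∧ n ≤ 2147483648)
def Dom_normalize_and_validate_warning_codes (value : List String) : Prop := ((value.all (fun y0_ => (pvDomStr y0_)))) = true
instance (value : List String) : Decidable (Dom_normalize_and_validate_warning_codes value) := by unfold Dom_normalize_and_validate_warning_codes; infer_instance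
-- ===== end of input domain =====

-- B dedupes by recursion that filters every later duplicate of the head out of the
-- tail before recursing (no seen-set, no dict), instead of A's build-then-dict.fromkeys;
-- same results, a different algorithm of similar cost.


-- ===== PORT A =====
-- ALLOWED_WARNING_CODES (membership test only, so the set's hash order is irrelevant)
def allowedWarningCodes : List String :=
  ["headline_stronger_than_body", "already_extended_intraday", "low_evidence_density",
   "theme_recycled", "contrarian_flow_risk", "policy_uncertainty",
   "liquidity_mismatch", "too_many_similar_news"]

-- A's loop building `normalized`; the two `raise ValueError` paths return the
-- accumulator as-is (those inputs are excluded by Pre_, where nothing is claimed).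
def buildNormalizedA (acc : List String) : List String → List String
  | [] => acc
  | item :: rest =>
    let code := PySem.Str.strip item
    if code = "" then acc
    else if ¬ (allowedWarningCodes.contains code) then acc
    else buildNormalizedA (acc ++ [code]) rest

def normalize_and_validate_warning_codes (value : List String) : List String :=
  PySem.List.dedup (buildNormalizedA [] value)   -- list(dict.fromkeys(normalized))

-- ===== PORT B =====
-- B's recursive `rec`: validate the head, drop every later duplicate of its code
-- from the tail, recurse; the raise paths return [] (outside Pre_, nothing claimed).
def recB : List String → List String
  | [] => []
  | item :: rest =>
    let code := PySem.Str.strip item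
    if code = "" then []
    else if ¬ (allowedWarningCodes.contains code) then []
    else code :: recB (rest.filter (fun it => PySem.Str.strip it ≠ code))
termination_by items => items.length
decreasing_by
  simpa using Nat.lt_succ_of_le (le_trans (List.length_filter_le _ _) (by simp))

def normalize_and_validate_warning_codes_alt (value : List String) : List String :=
  recB value

-- ===== PRECONDITION & SPEC =====
-- Pre_: exactly the inputs where A returns (no ValueError): every stripped item is a
-- nonempty allowed warning code.
def Pre_normalize_and_validate_warning_codes (value : List String) : Prop :=
  ∀ s ∈ value, PySem.Str.strip s ≠ "" ∧ allowedWarningCodes.contains (PySem.Str.strip s) = true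
instance (value : List String) : Decidable (Pre_normalize_and_validate_warning_codes value) := by unfold Pre_normalize_and_validate_warning_codes; infer_instance

def pvWitness_normalize_and_validate_warning_codes : List String :=
  ["policy_uncertainty", " theme_recycled ", "policy_uncertainty"]

def Spec_normalize_and_validate_warning_codes (value : List String) (out : List String) : Prop := out = normalize_and_validate_warning_codes_alt value
instance (value : List String) (out : List String) : Decidable (Spec_normalize_and_validate_warning_codes value out) := by unfold Spec_normalize_and_validate_warning_codes; infer_instance

-- ===== CLAIM (what is proved, stated in full; the proofs are below) =====
def Claim_equal_normalize_and_validate_warning_codes : Prop := ∀ (value : List String), Dom_normalize_and_validate_warning_codes value → Pre_normalize_and_validate_warning_codes value → Spec_normalize_and_validate_warning_codes value (normalize_and_validate_warning_codes value)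

-- ===== LEMMAS AND PROOFS =====

-- Under Pre_, A's loop just appends the stripped codes: acc ++ map strip.
theorem buildNormalizedA_eq_map (value : List String) (acc : List String)
    (h : ∀ s ∈ value, PySem.Str.strip s ≠ "" ∧ allowedWarningCodes.contains (PySem.Str.strip s) = true) :
    buildNormalizedA acc value = acc ++ value.map PySem.Str.strip := by
  induction value generalizing acc with
  | nil => simp [buildNormalizedA]
  | cons item rest ih =>
    obtain ⟨h1, h2⟩ := h item (List.mem_cons_self ..)
    simp only [buildNormalizedA]
    rw [if_neg h1, if_neg (by simpa using h2)]
    rw [ih _ (fun s hs => h s (List.mem_cons_of_mem _ hs))]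
    simp

-- First-occurrence dedup by filtering the later duplicates away, on a plain list.
def filterDedup : List String → List String
  | [] => []
  | x :: xs => x :: filterDedup (xs.filter (fun y => y ≠ x))
termination_by l => l.length
decreasing_by
  simpa using Nat.lt_succ_of_le (le_trans (List.length_filter_le _ _) (by simp))

-- Equation lemmas for the two well-founded recursions.
theorem recB_cons (item : String) (rest : List String) :
    recB (item :: rest) =
      (let code := PySem.Str.strip item
       if code = "" then []
       else if ¬ (allowedWarningCodes.contains code) then []
       else code :: recB (rest.filter (fun it => PySem.Str.strip it ≠ code))) := by
  rw [recB]

theorem fd_nil : filterDedup [] = [] := by rw [filterDedup]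

theorem fd_cons (x : String) (xs : List String) :
    filterDedup (x :: xs) = x :: filterDedup (xs.filter (fun y => y ≠ x)) := by
  rw [filterDedup]

-- Under Pre_, B's recursion is filterDedup of the stripped codes.
theorem recB_eq_filterDedup (value : List String)
    (h : ∀ s ∈ value, PySem.Str.strip s ≠ "" ∧ allowedWarningCodes.contains (PySem.Str.strip s) = true) :
    recB value = filterDedup (value.map PySem.Str.strip) := by
  induction hl : value.length using Nat.strong_induction_on generalizing value with
  | _ n ih =>
  cases value with
  | nil => rw [recB, List.map_nil, fd_nil]
  | cons item rest =>
    obtain ⟨h1, h2⟩ := h item (List.mem_cons_self ..)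
    rw [recB_cons, List.map_cons, fd_cons]
    simp only [if_neg h1, if_neg (not_not_intro h2)]
    have hfm : (rest.filter (fun it => PySem.Str.strip it ≠ PySem.Str.strip item)).map PySem.Str.strip
        = (rest.map PySem.Str.strip).filter (fun y => y ≠ PySem.Str.strip item) := by
      rw [List.filter_map]; rfl
    rw [← hfm]
    congr 1
    exact ih _ (by subst hl; simpa using Nat.lt_succ_of_le (List.length_filter_le _ _)) _
      (fun s hs => h s (List.mem_cons_of_mem _ (List.mem_of_mem_filter hs))) rfl

-- Folding Set.add over a list from any set s yields s followed by the
-- filterDedup of the elements not already in s.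
theorem foldl_add_eq_filterDedup (l : List String) (s : PySem.Set String) :
    l.foldl PySem.Set.add s = s ++ filterDedup (l.filter (fun y => ¬ (y ∈ s))) := by
  induction hl : l.length using Nat.strong_induction_on generalizing l s with
  | _ n ih =>
  cases l with
  | nil => simp [fd_nil]
  | cons x xs =>
    simp only [List.foldl_cons, List.filter_cons]
    by_cases hx : x ∈ s
    · have hadd : PySem.Set.add s x = s := by
        simp [PySem.Set.add, PySem.Set.contains, hx]
      rw [hadd]
      simp only [hx, not_true, decide_false, if_neg Bool.false_ne_true]
      exact ih _ (by subst hl; simp) _ _ rfl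
    · have hadd : PySem.Set.add s x = s ++ [x] := by
        simp [PySem.Set.add, PySem.Set.contains, hx]
      rw [hadd, ih _ (by subst hl; simp) _ _ rfl]
      simp only [hx, not_false_iff, decide_true, if_pos]
      rw [List.append_assoc, fd_cons]
      have hfil : xs.filter (fun y => ¬ (y ∈ s ++ [x]))
          = (xs.filter (fun y => ¬ (y ∈ s))).filter (fun y => y ≠ x) := by
        rw [List.filter_filter]
        apply List.filter_congr
        intro y _
        by_cases h1 : y = x <;> by_cases h2 : y ∈ s <;> simp [h1, h2]
      rw [hfil, List.singleton_append]

-- ===== VERDICT (by name: the statement is the Claim_ definition above) =====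
theorem normalize_and_validate_warning_codes_spec : Claim_equal_normalize_and_validate_warning_codes := by
  intro value _ hpre
  unfold Spec_normalize_and_validate_warning_codes
  unfold normalize_and_validate_warning_codes normalize_and_validate_warning_codes_alt
  rw [buildNormalizedA_eq_map value [] hpre, List.nil_append,
      recB_eq_filterDedup value hpre,
      PySem.List.dedup_eq_ofList, PySem.Set.ofList_eq_foldl,
      foldl_add_eq_filterDedup, List.nil_append]
  congr 1
  simp
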